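-- pv_equiv track=rewrite | github.com/Blurc2/PLN | tar2.py | OcurrenciaPalabra
-- ===== SOURCE A (Python) =====
-- def OcurrenciaPalabra(vocabulario, palabra):
--     cont = 0
--     list_pal_con = []
--     for lista in vocabulario:
--         for pal in lista:
--             list_pal_con.append(pal)
--
--     for word in list_pal_con:
--         if palabra == word:
--             cont += 1
--     return cont
-- ===== SOURCE B (Python) =====
-- def OcurrenciaPalabra(vocabulario, palabra):
--     total = 0
--     for lista in vocabulario:
--         total += lista.count(palabra)
--     return total
-- ===== Notes on version B (the rewrite author's own statement) =====
-- stated objective: simpler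
-- what changed: B drops the intermediate flat list entirely and accumulates per-sublist counts in one grouped pass via list.count, instead of A's build-then-scan two-pass structure.
import Mathlib
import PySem

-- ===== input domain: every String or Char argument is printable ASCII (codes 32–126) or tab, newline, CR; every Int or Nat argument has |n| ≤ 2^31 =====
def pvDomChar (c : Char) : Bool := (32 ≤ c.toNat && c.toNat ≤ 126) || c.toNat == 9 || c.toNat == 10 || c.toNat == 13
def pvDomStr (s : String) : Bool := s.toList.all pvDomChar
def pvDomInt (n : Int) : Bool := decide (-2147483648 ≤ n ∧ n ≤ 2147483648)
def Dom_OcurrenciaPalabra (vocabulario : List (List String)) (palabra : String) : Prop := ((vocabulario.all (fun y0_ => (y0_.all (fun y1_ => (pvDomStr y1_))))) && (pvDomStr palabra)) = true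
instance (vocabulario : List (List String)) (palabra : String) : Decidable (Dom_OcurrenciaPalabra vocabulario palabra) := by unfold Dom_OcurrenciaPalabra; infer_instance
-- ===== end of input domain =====

-- B replaces A's build-a-flat-list-then-scan two-pass structure with a single grouped pass
-- that accumulates per-sublist counts (simpler; no intermediate list).

-- ===== PORT A =====
def OcurrenciaPalabra (vocabulario : List (List String)) (palabra : String) : Int :=
  -- first loop: flatten vocabulario by appending word by word
  let list_pal_con : List String :=
    vocabulario.foldl (fun acc lista => lista.foldl (fun acc2 pal => acc2 ++ [pal]) acc) []
  -- second loop: count matches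
  list_pal_con.foldl (fun cont word => if palabra == word then cont + 1 else cont) 0

-- ===== PORT B =====
def OcurrenciaPalabra_alt (vocabulario : List (List String)) (palabra : String) : Int :=
  vocabulario.foldl (fun total lista => total + (PySem.List.count lista palabra : Int)) 0

-- ===== PRECONDITION & SPEC =====
def Spec_OcurrenciaPalabra (vocabulario : List (List String)) (palabra : String) (out : Int) : Prop := out = OcurrenciaPalabra_alt vocabulario palabra
instance (vocabulario : List (List String)) (palabra : String) (out : Int) : Decidable (Spec_OcurrenciaPalabra vocabulario palabra out) := by unfold Spec_OcurrenciaPalabra; infer_instance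

-- ===== CLAIM (what is proved, stated in full; the proofs are below) =====
def Claim_equal_OcurrenciaPalabra : Prop := ∀ (vocabulario : List (List String)) (palabra : String), Dom_OcurrenciaPalabra vocabulario palabra → Spec_OcurrenciaPalabra vocabulario palabra (OcurrenciaPalabra vocabulario palabra)

-- ===== LEMMAS AND PROOFS =====

-- The inner append loop of A appends the sublist to the accumulator.
theorem pv_inner_append (l : List String) (acc : List String) :
    l.foldl (fun acc2 pal => acc2 ++ [pal]) acc = acc ++ l := by
  induction l generalizing acc with
  | nil => simp
  | cons x xs ih => simp [List.foldl, ih]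

-- A's counting loop over a list, with symmetric equality test, counts occurrences.
theorem pv_count_loop (palabra : String) (l : List String) (c : Int) :
    l.foldl (fun cont word => if palabra == word then cont + 1 else cont) c
      = c + (l.count palabra : Int) := by
  induction l generalizing c with
  | nil => simp
  | cons x xs ih =>
    simp only [List.foldl, List.count_cons, ih]
    by_cases h : palabra = x
    · subst h; simp; ring
    · have h1 : (palabra == x) = false := by simp [h]
      have h2 : (x == palabra) = false := by simp [Ne.symm h]
      simp [h1, h2]

theorem pv_main (vocabulario : List (List String)) (palabra : String) :
    OcurrenciaPalabra vocabulario palabra = OcurrenciaPalabra_alt vocabulario palabra := by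
  unfold OcurrenciaPalabra OcurrenciaPalabra_alt
  induction vocabulario using List.reverseRecOn with
  | nil => simp
  | append_singleton ys l ih =>
    simp only [List.foldl_append, List.foldl_cons, List.foldl_nil,
      pv_inner_append, pv_count_loop, PySem.List.count_eq] at *
    omega

-- ===== VERDICT (by name: the statement is the Claim_ definition above) =====
theorem OcurrenciaPalabra_spec : Claim_equal_OcurrenciaPalabra := by
  intro v p _
  exact pv_main v p
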